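-- pv_equiv track=rewrite | github.com/mscroggs/acyclic-orientations | a334304.py | has_cycles
-- ===== SOURCE A (Python) =====
-- def has_cycles(edges, orient):
--     vertices = 0
--     for o, e in zip(orient, edges):
--         vertices = max(vertices, e[0]+1, e[1]+1)
--     for i in range(vertices):
--         after = [i]
--         p = 0
--         while p != len(after):
--             p = len(after)
--             for o, e in zip(orient, edges):
--                 if o and e[0] in after:
--                     if e[1] == i:
--                         return True
--                     if e[1] not in after:
--                         after.append(e[1])
--                 if not o and e[1] in after:
--                     if e[0] == i:
--                         return True
--                     if e[0] not in after:
--                         after.append(e[0])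
--     return False
-- ===== SOURCE B (Python) =====
-- def has_cycles(edges, orient):
--     # Directed edges according to orientation; adjacency index built once,
--     # then one BFS per vertex 0..n-1 looking for an edge back into the start vertex.
--     dir_edges = [(e[0], e[1]) if o else (e[1], e[0]) for o, e in zip(orient, edges)]
--     adj = {}
--     for u, v in dir_edges:
--         adj[u] = adj.get(u, []) + [v]
--     n = max((max(u, v) + 1 for u, v in dir_edges), default=0)
--     return any(_reaches_back(adj, i) for i in range(n))
--
--
-- def _reaches_back(adj, i):
--     # BFS from i over adj; True iff some reachable u has an edge u -> i.
--     seen = {i}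
--     queue = [i]
--     p = 0
--     while p < len(queue):
--         u = queue[p]
--         p += 1
--         for v in adj.get(u, []):
--             if v == i:
--                 return True
--             if v not in seen:
--                 seen.add(v)
--                 queue.append(v)
--     return False
-- ===== Notes on version B (the rewrite author's own statement) =====
-- stated objective: faster
-- what changed: A re-scans the whole edge list to saturation for every start vertex (a fixpoint loop with linear membership tests on a growing list); B builds an adjacency dict once and runs a single seen-set BFS per start vertex, checking for an edge back into it.
import Mathlib
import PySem

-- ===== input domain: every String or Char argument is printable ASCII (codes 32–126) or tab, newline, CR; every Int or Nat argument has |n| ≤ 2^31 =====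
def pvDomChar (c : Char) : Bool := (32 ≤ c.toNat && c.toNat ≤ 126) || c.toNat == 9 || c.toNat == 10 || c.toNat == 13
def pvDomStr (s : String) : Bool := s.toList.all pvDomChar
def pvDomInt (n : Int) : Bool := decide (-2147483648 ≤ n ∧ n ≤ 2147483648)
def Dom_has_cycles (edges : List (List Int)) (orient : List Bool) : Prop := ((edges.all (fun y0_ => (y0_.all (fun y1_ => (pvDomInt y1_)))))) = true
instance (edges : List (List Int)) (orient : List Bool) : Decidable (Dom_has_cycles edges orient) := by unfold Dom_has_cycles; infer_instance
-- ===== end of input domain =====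

-- B replaces A's per-vertex fixpoint re-scanning of the edge list by an adjacency
-- index built once plus one seen-set BFS per start vertex (objective: faster; measured).


-- ===== PORT A =====
-- e[k] for k = 0,1; total form of pyGet? (Pre_ guarantees 2 ≤ e.length, where it is exact)
def aGet (e : List Int) (k : Int) : Int := (PySem.List.pyGet? e k).getD 0

-- one pass of A's inner `for o, e in zip(orient, edges)` loop; none = `return True`
def stepA (i : Int) : List Int → List (Bool × List Int) → Option (List Int)
  | after, [] => some after
  | after, (o, e) :: rest =>
    if o then
      if after.contains (aGet e 0) then
        if aGet e 1 = i then none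
        else stepA i (if after.contains (aGet e 1) then after else after ++ [aGet e 1]) rest
      else stepA i after rest
    else
      if after.contains (aGet e 1) then
        if aGet e 0 = i then none
        else stepA i (if after.contains (aGet e 0) then after else after ++ [aGet e 0]) rest
      else stepA i after rest

-- A's `while p != len(after)` loop; fuel only makes it total (pairs.length + 2 provably suffices)
def whileA (i : Int) (pairs : List (Bool × List Int)) : Nat → List Int → Nat → Bool
  | 0, _, _ => false
  | fuel + 1, after, p =>
    if after.length = p then false
    else
      match stepA i after pairs with
      | none => true
      | some a' => whileA i pairs fuel a' after.length

def has_cycles (edges : List (List Int)) (orient : List Bool) : Bool :=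
  let pairs := orient.zip edges
  let vertices := pairs.foldl (fun v p => max (max v (aGet p.2 0 + 1)) (aGet p.2 1 + 1)) 0
  (PySem.List.pyRange 0 vertices 1).any (fun i => whileA i pairs (pairs.length + 2) [i] 0)

-- ===== PORT B =====
-- `(e[0], e[1]) if o else (e[1], e[0])` (total accessors as in port A)
def dirOf (p : Bool × List Int) : Int × Int :=
  if p.1 then ((PySem.List.pyGet? p.2 0).getD 0, (PySem.List.pyGet? p.2 1).getD 0)
  else ((PySem.List.pyGet? p.2 1).getD 0, (PySem.List.pyGet? p.2 0).getD 0)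

-- `for v in adj.get(u, [])` body; none = `return True`; returns (seen, newly queued)
def scanB (i : Int) : List Int → List Int → List Int → Option (List Int × List Int)
  | [], seen, new => some (seen, new)
  | v :: vs, seen, new =>
    if v = i then none
    else if seen.contains v then scanB i vs seen new
    else scanB i vs (seen ++ [v]) (new ++ [v])

-- B's `while p < len(queue)` loop; state = seen set and the unprocessed queue suffix
-- queue[p:]; fuel only makes it total (dir.length + 2 provably suffices)
def bfsB (i : Int) (adj : PySem.Dict Int (List Int)) : Nat → List Int → List Int → Bool
  | 0, _, _ => false
  | fuel + 1, seen, queue =>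
    match queue with
    | [] => false
    | u :: rest =>
      match scanB i (adj.getD u []) seen [] with
      | none => true
      | some (seen', new) => bfsB i adj fuel seen' (rest ++ new)

def has_cycles_alt (edges : List (List Int)) (orient : List Bool) : Bool :=
  let dir := (orient.zip edges).map dirOf
  let adj := dir.foldl (fun d p => d.modify p.1 [] (· ++ [p.2])) PySem.Dict.empty
  let n := PySem.List.maxD (dir.map (fun q => max q.1 q.2 + 1)) (fun x => x) 0
  (PySem.List.pyRange 0 n 1).any (fun i => bfsB i adj (dir.length + 2) [i] [i])

-- ===== PRECONDITION & SPEC =====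
-- Pre_ excludes exactly the inputs on which A raises: every edge the zip reads must
-- have at least two entries (A's e[0]/e[1] raises IndexError otherwise).
def Pre_has_cycles (edges : List (List Int)) (orient : List Bool) : Prop :=
  ∀ p ∈ orient.zip edges, 2 ≤ p.2.length
instance (edges : List (List Int)) (orient : List Bool) : Decidable (Pre_has_cycles edges orient) := by
  unfold Pre_has_cycles; infer_instance

def pvWitness_has_cycles : List (List Int) × List Bool := ([[0, 1], [1, 0]], [true, true])

def Spec_has_cycles (edges : List (List Int)) (orient : List Bool) (out : Bool) : Prop := out = has_cycles_alt edges orient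
instance (edges : List (List Int)) (orient : List Bool) (out : Bool) : Decidable (Spec_has_cycles edges orient out) := by unfold Spec_has_cycles; infer_instance

-- ===== CLAIM (what is proved, stated in full; the proofs are below) =====
def Claim_equal_has_cycles : Prop := ∀ (edges : List (List Int)) (orient : List Bool), Dom_has_cycles edges orient → Pre_has_cycles edges orient → Spec_has_cycles edges orient (has_cycles edges orient)

-- ===== LEMMAS AND PROOFS =====

-- the directed-edge relation both programs traverse
def EdgeTo (pairs : List (Bool × List Int)) (u v : Int) : Prop :=
  ∃ p ∈ pairs, (dirOf p).1 = u ∧ (dirOf p).2 = v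

-- reachability from i along EdgeTo
inductive Reach (pairs : List (Bool × List Int)) (i : Int) : Int → Prop
  | base : Reach pairs i i
  | step {u v : Int} : Reach pairs i u → EdgeTo pairs u v → Reach pairs i v

-- "i lies on a directed cycle" — what both programs test per start vertex i
def Cyc (pairs : List (Bool × List Int)) (i : Int) : Prop :=
  ∃ u, Reach pairs i u ∧ EdgeTo pairs u i

-- the candidate members of A's `after` list / B's `seen` set
def iTgts (pairs : List (Bool × List Int)) (i : Int) : List Int :=
  i :: pairs.map (fun p => (dirOf p).2)

lemma reach_subset_of_closed (pairs : List (Bool × List Int)) (i : Int) (s : List Int)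
    (hi : i ∈ s) (hcl : ∀ u v, u ∈ s → EdgeTo pairs u v → v ∈ s) :
    ∀ x, Reach pairs i x → x ∈ s := by
  intro x hx
  induction hx with
  | base => exact hi
  | step hr he ih => exact hcl _ _ ih he

-- dirOf in terms of aGet (used to connect A's accessors with B's)
lemma dirOf_eq (p : Bool × List Int) :
    dirOf p = if p.1 then (aGet p.2 0, aGet p.2 1) else (aGet p.2 1, aGet p.2 0) := by
  simp [dirOf, aGet]

lemma length_le_iTgts (pairs : List (Bool × List Int)) (i : Int) (s : List Int)
    (hn : s.Nodup) (hsub : ∀ x ∈ s, x ∈ iTgts pairs i) :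
    s.length ≤ pairs.length + 1 := by
  have := (hn.subperm (fun x hx => hsub x hx)).length_le
  simpa [iTgts] using this

-- ---------- A-side ----------

lemma stepA_prefix (i : Int) :
    ∀ (l : List (Bool × List Int)) (after a' : List Int),
      stepA i after l = some a' → after <+: a' := by
  intro l
  induction l with
  | nil => intro after a' h; simp [stepA] at h; simp [h]
  | cons q rest ih =>
    intro after a' h
    obtain ⟨o, e⟩ := q
    cases o with
    | false =>
      simp only [stepA, Bool.false_eq_true, if_false] at h
      split_ifs at h with h1 h2 h3
      · exact ih _ _ h
      · exact (List.prefix_append after [aGet e 0]).trans (ih _ _ h)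
      · exact ih _ _ h
    | true =>
      simp only [stepA, if_true] at h
      split_ifs at h with h1 h2 h3
      · exact ih _ _ h
      · exact (List.prefix_append after [aGet e 1]).trans (ih _ _ h)
      · exact ih _ _ h

lemma stepA_nodup (i : Int) :
    ∀ (l : List (Bool × List Int)) (after a' : List Int),
      stepA i after l = some a' → after.Nodup → a'.Nodup := by
  intro l
  induction l with
  | nil => intro after a' h hn; simp [stepA] at h; simpa [← h]
  | cons q rest ih =>
    intro after a' h hn
    obtain ⟨o, e⟩ := q
    cases o with
    | false =>
      simp only [stepA, Bool.false_eq_true, if_false] at h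
      split_ifs at h with h1 h2 h3
      · exact ih _ _ h hn
      · refine ih _ _ h (List.Nodup.append hn (by simp) ?_)
        intro a ha hb
        simp at hb; subst hb
        exact h3 (List.elem_eq_true_of_mem ha)
      · exact ih _ _ h hn
    | true =>
      simp only [stepA, if_true] at h
      split_ifs at h with h1 h2 h3
      · exact ih _ _ h hn
      · refine ih _ _ h (List.Nodup.append hn (by simp) ?_)
        intro a ha hb
        simp at hb; subst hb
        exact h3 (List.elem_eq_true_of_mem ha)
      · exact ih _ _ h hn

lemma stepA_tgts (i : Int) (pairs : List (Bool × List Int)) :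
    ∀ (l : List (Bool × List Int)), (∀ p ∈ l, p ∈ pairs) →
    ∀ (after a' : List Int), stepA i after l = some a' →
    ∀ x ∈ a', x ∈ after ∨ ∃ p ∈ pairs, (dirOf p).2 = x := by
  intro l
  induction l with
  | nil =>
    intro _ after a' h x hx
    simp [stepA] at h; subst h; exact Or.inl hx
  | cons q rest ih =>
    intro hsub after a' h x hx
    obtain ⟨o, e⟩ := q
    have hq : (o, e) ∈ pairs := hsub _ (by simp)
    have hrest : ∀ p ∈ rest, p ∈ pairs := fun p hp => hsub _ (by simp [hp])
    cases o with
    | false =>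
      simp only [stepA, Bool.false_eq_true, if_false] at h
      split_ifs at h with h1 h2 h3
      · exact ih hrest _ _ h x hx
      · rcases ih hrest _ _ h x hx with hx' | hx'
        · rcases List.mem_append.mp hx' with hx'' | hx''
          · exact Or.inl hx''
          · simp at hx''; subst hx''
            exact Or.inr ⟨(false, e), hq, by simp [dirOf_eq]⟩
        · exact Or.inr hx'
      · exact ih hrest _ _ h x hx
    | true =>
      simp only [stepA, if_true] at h
      split_ifs at h with h1 h2 h3
      · exact ih hrest _ _ h x hx
      · rcases ih hrest _ _ h x hx with hx' | hx'
        · rcases List.mem_append.mp hx' with hx'' | hx''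
          · exact Or.inl hx''
          · simp at hx''; subst hx''
            exact Or.inr ⟨(true, e), hq, by simp [dirOf_eq]⟩
        · exact Or.inr hx'
      · exact ih hrest _ _ h x hx

lemma stepA_sound (i : Int) (pairs : List (Bool × List Int)) :
    ∀ (l : List (Bool × List Int)), (∀ p ∈ l, p ∈ pairs) →
    ∀ (after : List Int), (∀ x ∈ after, Reach pairs i x) →
    (stepA i after l = none → Cyc pairs i) ∧
    (∀ a', stepA i after l = some a' → ∀ x ∈ a', Reach pairs i x) := by
  intro l
  induction l with
  | nil =>
    intro _ after hr
    constructor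
    · intro h; simp [stepA] at h
    · intro a' h x hx; simp [stepA] at h; subst h; exact hr x hx
  | cons q rest ih =>
    intro hsub after hr
    obtain ⟨o, e⟩ := q
    have hq : (o, e) ∈ pairs := hsub _ (by simp)
    have hrest : ∀ p ∈ rest, p ∈ pairs := fun p hp => hsub _ (by simp [hp])
    cases o with
    | false =>
      have hedge : EdgeTo pairs (aGet e 1) (aGet e 0) :=
        ⟨(false, e), hq, by simp [dirOf_eq]⟩
      simp only [stepA, Bool.false_eq_true, if_false]
      split_ifs with h1 h2 h3
      · constructor
        · intro _
          exact ⟨aGet e 1, hr _ (List.mem_of_elem_eq_true h1), h2 ▸ hedge⟩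
        · intro a' h; simp at h
      · exact ih hrest _ hr
      · refine ih hrest _ ?_
        intro x hx
        rcases List.mem_append.mp hx with hx' | hx'
        · exact hr x hx'
        · simp at hx'; subst hx'
          exact Reach.step (hr _ (List.mem_of_elem_eq_true h1)) hedge
      · exact ih hrest _ hr
    | true =>
      have hedge : EdgeTo pairs (aGet e 0) (aGet e 1) :=
        ⟨(true, e), hq, by simp [dirOf_eq]⟩
      simp only [stepA, if_true]
      split_ifs with h1 h2 h3
      · constructor
        · intro _
          exact ⟨aGet e 0, hr _ (List.mem_of_elem_eq_true h1), h2 ▸ hedge⟩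
        · intro a' h; simp at h
      · exact ih hrest _ hr
      · refine ih hrest _ ?_
        intro x hx
        rcases List.mem_append.mp hx with hx' | hx'
        · exact hr x hx'
        · simp at hx'; subst hx'
          exact Reach.step (hr _ (List.mem_of_elem_eq_true h1)) hedge
      · exact ih hrest _ hr

lemma stepA_fix (i : Int) :
    ∀ (l : List (Bool × List Int)) (after : List Int),
      stepA i after l = some after →
      ∀ p ∈ l, (dirOf p).1 ∈ after → (dirOf p).2 ≠ i ∧ (dirOf p).2 ∈ after := by
  intro l
  induction l with
  | nil => intro after _ p hp; simp at hp
  | cons q rest ih =>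
    intro after h p hp
    obtain ⟨o, e⟩ := q
    cases o with
    | false =>
      simp only [stepA, Bool.false_eq_true, if_false] at h
      split_ifs at h with h1 h2 h3
      · intro hmem
        rcases List.mem_cons.mp hp with hp' | hp'
        · subst hp'
          exact ⟨by simpa [dirOf_eq] using h2, by simpa [dirOf_eq] using List.mem_of_elem_eq_true h3⟩
        · exact ih _ h p hp' hmem
      · exfalso
        have := (stepA_prefix i rest _ _ h).length_le
        simp at this
      · intro hmem
        rcases List.mem_cons.mp hp with hp' | hp'
        · subst hp'
          exact absurd (List.elem_eq_true_of_mem (by simpa [dirOf_eq] using hmem)) h1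
        · exact ih _ h p hp' hmem
    | true =>
      simp only [stepA, if_true] at h
      split_ifs at h with h1 h2 h3
      · intro hmem
        rcases List.mem_cons.mp hp with hp' | hp'
        · subst hp'
          exact ⟨by simpa [dirOf_eq] using h2, by simpa [dirOf_eq] using List.mem_of_elem_eq_true h3⟩
        · exact ih _ h p hp' hmem
      · exfalso
        have := (stepA_prefix i rest _ _ h).length_le
        simp at this
      · intro hmem
        rcases List.mem_cons.mp hp with hp' | hp'
        · subst hp'
          exact absurd (List.elem_eq_true_of_mem (by simpa [dirOf_eq] using hmem)) h1
        · exact ih _ h p hp' hmem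

lemma fix_no_cyc (i : Int) (pairs : List (Bool × List Int)) (after : List Int)
    (hfix : stepA i after pairs = some after) (hi : i ∈ after) : ¬ Cyc pairs i := by
  rintro ⟨u, hr, p, hp, h1, h2⟩
  have hcl : ∀ a b, a ∈ after → EdgeTo pairs a b → b ∈ after := by
    rintro a b ha ⟨q, hq, hq1, hq2⟩
    exact hq2 ▸ (stepA_fix i pairs after hfix q hq (hq1 ▸ ha)).2
  have hu : u ∈ after := reach_subset_of_closed pairs i after hi hcl u hr
  exact (stepA_fix i pairs after hfix p hp (h1 ▸ hu)).1 h2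

lemma whileA_false (i : Int) (pairs : List (Bool × List Int)) :
    ∀ (fuel : Nat) (after : List Int) (p : Nat),
      after.Nodup → i ∈ after → (∀ x ∈ after, x ∈ iTgts pairs i) →
      pairs.length + 3 ≤ fuel + after.length →
      (after.length = p → stepA i after pairs = some after) →
      whileA i pairs fuel after p = false → ¬ Cyc pairs i := by
  intro fuel
  induction fuel with
  | zero =>
    intro after p hn _ hsub hfuel _ _
    have := length_le_iTgts pairs i after hn hsub
    omega
  | succ f ih =>
    intro after p hn hi hsub hfuel hinv hw
    by_cases hlp : after.length = p
    · exact fix_no_cyc i pairs after (hinv hlp) hi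
    · simp only [whileA, if_neg hlp] at hw
      cases hs : stepA i after pairs with
      | none => rw [hs] at hw; simp at hw
      | some a' =>
        rw [hs] at hw
        have hpre := stepA_prefix i pairs _ _ hs
        by_cases hlen : a'.length = after.length
        · have heq : after = a' := hpre.eq_of_length hlen.symm
          rw [← heq] at hs
          exact fix_no_cyc i pairs after hs hi
        · have hgrow : after.length + 1 ≤ a'.length := by
            have := hpre.length_le; omega
          refine ih a' after.length (stepA_nodup i pairs _ _ hs hn) (hpre.subset hi) ?_ (by omega) (fun h => by omega) hw
          intro x hx
          rcases stepA_tgts i pairs pairs (fun _ h => h) _ _ hs x hx with h' | ⟨q, hq, hq2⟩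
          · exact hsub x h'
          · exact hq2 ▸ List.mem_cons_of_mem _ (List.mem_map.mpr ⟨q, hq, rfl⟩)

lemma whileA_true (i : Int) (pairs : List (Bool × List Int)) :
    ∀ (fuel : Nat) (after : List Int) (p : Nat),
      (∀ x ∈ after, Reach pairs i x) →
      whileA i pairs fuel after p = true → Cyc pairs i := by
  intro fuel
  induction fuel with
  | zero => intro after p _ hw; simp [whileA] at hw
  | succ f ih =>
    intro after p hr hw
    by_cases hlp : after.length = p
    · simp [whileA, hlp] at hw
    · simp only [whileA, if_neg hlp] at hw
      cases hs : stepA i after pairs with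
      | none => exact (stepA_sound i pairs pairs (fun _ h => h) after hr).1 hs
      | some a' =>
        rw [hs] at hw
        exact ih a' after.length ((stepA_sound i pairs pairs (fun _ h => h) after hr).2 a' hs) hw

lemma A_iff (pairs : List (Bool × List Int)) (i : Int) :
    whileA i pairs (pairs.length + 2) [i] 0 = true ↔ Cyc pairs i := by
  constructor
  · intro h
    refine whileA_true i pairs _ [i] 0 ?_ h
    intro x hx; simp at hx; subst hx; exact Reach.base
  · intro hc
    by_contra h
    have hw : whileA i pairs (pairs.length + 2) [i] 0 = false := by
      cases hb : whileA i pairs (pairs.length + 2) [i] 0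
      · rfl
      · exact absurd hb h
    refine whileA_false i pairs (pairs.length + 2) [i] 0 (by simp) (by simp)
      (fun x hx => by simp at hx; subst hx; simp [iTgts]) (by simp) (by simp) hw hc

-- ---------- B-side ----------

-- what adj.getD u [] computes: the successor list of u
def adjL (pairs : List (Bool × List Int)) (u : Int) : List Int :=
  ((pairs.map dirOf).filter (fun q => q.1 == u)).map (fun q => q.2)

lemma adj_getD (pairs : List (Bool × List Int)) (u : Int) :
    ((pairs.map dirOf).foldl (fun d p => d.modify p.1 [] (· ++ [p.2])) PySem.Dict.empty).getD u []
      = adjL pairs u := by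
  rw [PySem.Dict.getD_foldl_modify_append]
  simp [adjL, PySem.Dict.getD_empty]

lemma mem_adjL (pairs : List (Bool × List Int)) (u v : Int) :
    v ∈ adjL pairs u ↔ EdgeTo pairs u v := by
  simp only [adjL, EdgeTo, List.mem_map, List.mem_filter, List.mem_map]
  constructor
  · rintro ⟨q, ⟨⟨p, hp, rfl⟩, h2⟩, rfl⟩
    exact ⟨p, hp, by simpa using h2, rfl⟩
  · rintro ⟨p, hp, h1, h2⟩
    exact ⟨dirOf p, ⟨⟨p, hp, rfl⟩, by simpa using h1⟩, h2⟩

lemma scanB_none (i : Int) :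
    ∀ (vs seen new : List Int), scanB i vs seen new = none ↔ i ∈ vs := by
  intro vs
  induction vs with
  | nil => intro seen new; simp [scanB]
  | cons v vs ih =>
    intro seen new
    simp only [scanB]
    split_ifs with h1 h2
    · simp [h1]
    · rw [ih]; constructor
      · exact fun h => List.mem_cons_of_mem _ h
      · intro h; rcases List.mem_cons.mp h with h | h
        · exact absurd h.symm h1
        · exact h
    · rw [ih]; constructor
      · exact fun h => List.mem_cons_of_mem _ h
      · intro h; rcases List.mem_cons.mp h with h | h
        · exact absurd h.symm h1
        · exact h

lemma scanB_some (i : Int) :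
    ∀ (vs seen new s' n' : List Int), scanB i vs seen new = some (s', n') →
      ∃ fresh, s' = seen ++ fresh ∧ n' = new ++ fresh ∧
        (∀ x ∈ fresh, x ∉ seen ∧ x ∈ vs) ∧ fresh.Nodup ∧
        (∀ v ∈ vs, v ≠ i ∧ v ∈ s') := by
  intro vs
  induction vs with
  | nil =>
    intro seen new s' n' h
    simp only [scanB, Option.some_inj, Prod.mk.injEq] at h
    exact ⟨[], by simp [h.1.symm], by simp [h.2.symm], by simp, by simp, by simp⟩
  | cons v vs ih =>
    intro seen new s' n' h
    simp only [scanB] at h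
    split_ifs at h with h1 h2
    · obtain ⟨fresh, hs, hn, hf, hnd, hv⟩ := ih _ _ _ _ h
      refine ⟨fresh, hs, hn, ?_, hnd, ?_⟩
      · exact fun x hx => ⟨(hf x hx).1, List.mem_cons_of_mem _ (hf x hx).2⟩
      · intro w hw
        rcases List.mem_cons.mp hw with hw' | hw'
        · subst hw'
          exact ⟨h1, hs ▸ List.mem_append_left _ (List.mem_of_elem_eq_true h2)⟩
        · exact hv w hw'
    · obtain ⟨fresh, hs, hn, hf, hnd, hv⟩ := ih _ _ _ _ h
      refine ⟨v :: fresh, by simpa using hs, by simpa using hn, ?_, ?_, ?_⟩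
      · intro x hx
        rcases List.mem_cons.mp hx with hx' | hx'
        · subst hx'
          exact ⟨fun hc => h2 (List.elem_eq_true_of_mem hc), by simp⟩
        · have := hf x hx'
          exact ⟨fun hc => this.1 (List.mem_append_left _ hc), List.mem_cons_of_mem _ this.2⟩
      · refine List.nodup_cons.mpr ⟨?_, hnd⟩
        intro hc
        exact (hf v hc).1 (List.mem_append_right _ (by simp))
      · intro w hw
        rcases List.mem_cons.mp hw with hw' | hw'
        · subst hw'
          exact ⟨h1, hs ▸ List.mem_append_left _ (List.mem_append_right _ (by simp))⟩
        · exact hv w hw'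

lemma bfsB_false (i : Int) (pairs : List (Bool × List Int)) (adj : PySem.Dict Int (List Int))
    (hadj : ∀ u, adj.getD u [] = adjL pairs u) :
    ∀ (fuel : Nat) (seen queue : List Int),
      seen.Nodup → i ∈ seen → (∀ x ∈ queue, x ∈ seen) → (∀ x ∈ seen, x ∈ iTgts pairs i) →
      (∀ u ∈ seen, u ∈ queue ∨ (∀ v, EdgeTo pairs u v → v ≠ i ∧ v ∈ seen)) →
      pairs.length + 2 + queue.length ≤ fuel + seen.length →
      bfsB i adj fuel seen queue = false → ¬ Cyc pairs i := by
  intro fuel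
  induction fuel with
  | zero =>
    intro seen queue hn _ _ hsub _ hfuel _
    have := length_le_iTgts pairs i seen hn hsub
    omega
  | succ f ih =>
    intro seen queue hn hi hq hsub hproc hfuel hw
    cases queue with
    | nil =>
      rintro ⟨u, hr, he⟩
      have hcl : ∀ a b, a ∈ seen → EdgeTo pairs a b → b ∈ seen := by
        intro a b ha hab
        rcases hproc a ha with h | h
        · simp at h
        · exact (h b hab).2
      have hu : u ∈ seen := reach_subset_of_closed pairs i seen hi hcl u hr
      rcases hproc u hu with h | h
      · simp at h
      · exact (h i he).1 rfl
    | cons u rest =>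
      simp only [bfsB] at hw
      cases hsb : scanB i (adj.getD u []) seen [] with
      | none => rw [hsb] at hw; simp at hw
      | some pr =>
        obtain ⟨s', new⟩ := pr
        rw [hsb] at hw
        obtain ⟨fresh, hs, hnew, hf, hnd, hv⟩ := scanB_some i _ _ _ _ _ hsb
        simp only [List.nil_append] at hnew
        subst hnew
        have hseen_sub : ∀ x ∈ seen, x ∈ s' := fun x hx => hs ▸ List.mem_append_left _ hx
        have hfresh_adj : ∀ x ∈ new, EdgeTo pairs u x := by
          intro x hx
          have hm := (hf x hx).2
          rw [hadj u] at hm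
          exact (mem_adjL pairs u x).mp hm
        refine ih s' (rest ++ new) ?_ (hseen_sub i hi) ?_ ?_ ?_ ?_ hw
        · rw [hs]
          refine List.Nodup.append hn hnd ?_
          intro a ha hb
          exact (hf a hb).1 ha
        · intro x hx
          rcases List.mem_append.mp hx with hx' | hx'
          · exact hseen_sub x (hq x (List.mem_cons_of_mem _ hx'))
          · exact hs ▸ List.mem_append_right _ hx'
        · intro x hx
          rw [hs] at hx
          rcases List.mem_append.mp hx with hx' | hx'
          · exact hsub x hx'
          · obtain ⟨p, hp, _, h2⟩ := hfresh_adj x hx'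
            exact h2 ▸ List.mem_cons_of_mem _ (List.mem_map.mpr ⟨p, hp, rfl⟩)
        · intro w hw'
          rw [hs] at hw'
          rcases List.mem_append.mp hw' with hw'' | hw''
          · rcases hproc w hw'' with h | h
            · rcases List.mem_cons.mp h with h' | h'
              · subst h'
                refine Or.inr (fun v hv' => ?_)
                have hvm : v ∈ adj.getD w [] := by
                  rw [hadj w]; exact (mem_adjL pairs w v).mpr hv'
                exact hv v hvm
              · exact Or.inl (List.mem_append_left _ h')
            · exact Or.inr (fun v hv' => ⟨(h v hv').1, hseen_sub _ (h v hv').2⟩)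
          · exact Or.inl (List.mem_append_right _ hw'')
        · have h1 : s'.length = seen.length + new.length := by simp [hs]
          simp only [List.length_append, List.length_cons] at hfuel ⊢
          omega

lemma bfsB_true (i : Int) (pairs : List (Bool × List Int)) (adj : PySem.Dict Int (List Int))
    (hadj : ∀ u, adj.getD u [] = adjL pairs u) :
    ∀ (fuel : Nat) (seen queue : List Int),
      (∀ x ∈ seen, Reach pairs i x) → (∀ x ∈ queue, x ∈ seen) →
      bfsB i adj fuel seen queue = true → Cyc pairs i := by
  intro fuel
  induction fuel with
  | zero => intro seen queue _ _ hw; simp [bfsB] at hw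
  | succ f ih =>
    intro seen queue hr hq hw
    cases queue with
    | nil => simp [bfsB] at hw
    | cons u rest =>
      simp only [bfsB] at hw
      have hru : Reach pairs i u := hr u (hq u (by simp))
      cases hsb : scanB i (adj.getD u []) seen [] with
      | none =>
        have hm : i ∈ adj.getD u [] := (scanB_none i _ _ _).mp hsb
        rw [hadj u] at hm
        exact ⟨u, hru, (mem_adjL pairs u i).mp hm⟩
      | some pr =>
        obtain ⟨s', new⟩ := pr
        rw [hsb] at hw
        obtain ⟨fresh, hs, hnew, hf, _, _⟩ := scanB_some i _ _ _ _ _ hsb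
        simp only [List.nil_append] at hnew
        subst hnew
        refine ih s' (rest ++ new) ?_ ?_ hw
        · intro x hx
          rw [hs] at hx
          rcases List.mem_append.mp hx with hx' | hx'
          · exact hr x hx'
          · have hm := (hf x hx').2
            rw [hadj u] at hm
            exact Reach.step hru ((mem_adjL pairs u x).mp hm)
        · intro x hx
          rcases List.mem_append.mp hx with hx' | hx'
          · exact hs ▸ List.mem_append_left _ (hq x (List.mem_cons_of_mem _ hx'))
          · exact hs ▸ List.mem_append_right _ hx'

lemma B_iff (pairs : List (Bool × List Int)) (adj : PySem.Dict Int (List Int))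
    (hadj : ∀ u, adj.getD u [] = adjL pairs u) (i : Int) :
    bfsB i adj (pairs.length + 2) [i] [i] = true ↔ Cyc pairs i := by
  constructor
  · intro h
    refine bfsB_true i pairs adj hadj _ [i] [i] ?_ (fun x hx => hx) h
    intro x hx; simp at hx; subst hx; exact Reach.base
  · intro hc
    by_contra h
    have hw : bfsB i adj (pairs.length + 2) [i] [i] = false := by
      cases hb : bfsB i adj (pairs.length + 2) [i] [i]
      · rfl
      · exact absurd hb h
    refine bfsB_false i pairs adj hadj (pairs.length + 2) [i] [i] (by simp) (by simp)
      (fun x hx => hx) (fun x hx => by simp at hx; subst hx; simp [iTgts])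
      (fun u hu => Or.inl (by simpa using hu)) (by simp) hw hc

-- ---------- assembling the equivalence ----------

-- the running double max A computes bounds every argument it saw
lemma foldl_max2_bound (l : List (Bool × List Int)) (f g : (Bool × List Int) → Int) :
    ∀ init : Int,
      init ≤ l.foldl (fun v p => max (max v (f p)) (g p)) init ∧
      ∀ p ∈ l, f p ≤ l.foldl (fun v p => max (max v (f p)) (g p)) init ∧
               g p ≤ l.foldl (fun v p => max (max v (f p)) (g p)) init := by
  induction l with
  | nil => intro init; simp
  | cons a t ih =>
    intro init
    simp only [List.foldl_cons]
    obtain ⟨h1, h2⟩ := ih (max (max init (f a)) (g a))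
    refine ⟨le_trans ((le_max_left _ _).trans (le_max_left _ _)) h1, ?_⟩
    intro p hp
    rcases List.mem_cons.mp hp with hp' | hp'
    · subst hp'
      exact ⟨le_trans (le_trans (le_max_right _ _) (le_max_left _ _)) h1,
             le_trans (le_max_right _ _) h1⟩
    · exact h2 p hp'

-- a member is bounded by Python max(..., default)
lemma le_maxD_of_mem (xs : List Int) (d y : Int) (hy : y ∈ xs) :
    y ≤ PySem.List.maxD xs (fun x => x) d := by
  cases hm : PySem.List.max? xs (fun x => x) with
  | none =>
    exact absurd ((PySem.List.max?_eq_none_iff _ _).mp hm) (List.ne_nil_of_mem hy)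
  | some m =>
    have := PySem.List.max?_isMax hm y hy
    simpa [PySem.List.maxD, hm] using this

-- every vertex on a cycle is the target of a scanned edge
lemma cyc_tgt (pairs : List (Bool × List Int)) (i : Int) (hc : Cyc pairs i) :
    ∃ p ∈ pairs, (dirOf p).2 = i := by
  obtain ⟨u, _, p, hp, _, h2⟩ := hc
  exact ⟨p, hp, h2⟩

-- a scanned target is below A's vertex count
lemma tgt_lt_countA (pairs : List (Bool × List Int)) (p : Bool × List Int) (hp : p ∈ pairs) :
    (dirOf p).2 < pairs.foldl (fun v p => max (max v (aGet p.2 0 + 1)) (aGet p.2 1 + 1)) 0 := by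
  have hbound := (foldl_max2_bound pairs
      (fun p => aGet p.2 0 + 1) (fun p => aGet p.2 1 + 1) 0).2 p hp
  rw [dirOf_eq]
  by_cases hb : p.1 = true
  · rw [if_pos hb]
    show aGet p.2 1 < _
    omega
  · rw [if_neg hb]
    show aGet p.2 0 < _
    omega

-- a scanned target is below B's vertex count
lemma tgt_lt_countB (pairs : List (Bool × List Int)) (p : Bool × List Int) (hp : p ∈ pairs) :
    (dirOf p).2 <
      PySem.List.maxD ((pairs.map dirOf).map (fun q => max q.1 q.2 + 1)) (fun x => x) 0 := by
  have hmem : max (dirOf p).1 (dirOf p).2 + 1 ∈ (pairs.map dirOf).map (fun q => max q.1 q.2 + 1) :=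
    List.mem_map.mpr ⟨dirOf p, List.mem_map.mpr ⟨p, hp, rfl⟩, rfl⟩
  have := le_maxD_of_mem _ 0 _ hmem
  have h2 : (dirOf p).2 ≤ max (dirOf p).1 (dirOf p).2 := le_max_right _ _
  omega

-- ===== VERDICT (by name: the statement is the Claim_ definition above) =====
theorem has_cycles_spec : Claim_equal_has_cycles := by
  intro edges orient _ _
  unfold Spec_has_cycles has_cycles has_cycles_alt
  simp only []
  set pairs := orient.zip edges with hpairs
  set dir := pairs.map dirOf with hdir
  set adj := dir.foldl (fun d p => d.modify p.1 [] (· ++ [p.2])) PySem.Dict.empty with hadjdef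
  have hadj : ∀ u, adj.getD u [] = adjL pairs u := fun u => adj_getD pairs u
  have hlen : dir.length = pairs.length := by simp [hdir]
  apply Bool.eq_iff_iff.mpr
  rw [List.any_eq_true, List.any_eq_true]
  constructor
  · rintro ⟨i, hmem, hi⟩
    have hc : Cyc pairs i := (A_iff pairs i).mp hi
    obtain ⟨p, hp, hp2⟩ := cyc_tgt pairs i hc
    refine ⟨i, PySem.List.mem_pyRange_one.mpr
      ⟨(PySem.List.mem_pyRange_one.mp hmem).1, hp2 ▸ tgt_lt_countB pairs p hp⟩, ?_⟩
    rw [hlen]; exact (B_iff pairs adj hadj i).mpr hc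
  · rintro ⟨i, hmem, hi⟩
    rw [hlen] at hi
    have hc : Cyc pairs i := (B_iff pairs adj hadj i).mp hi
    obtain ⟨p, hp, hp2⟩ := cyc_tgt pairs i hc
    refine ⟨i, PySem.List.mem_pyRange_one.mpr
      ⟨(PySem.List.mem_pyRange_one.mp hmem).1, hp2 ▸ tgt_lt_countA pairs p hp⟩,
      (A_iff pairs i).mpr hc⟩
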